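-- pv_equiv track=rewrite | github.com/biam05/FPRO_MIEIC | exercicios/RE09DICTIONARIES/sparse_dot_product.py | sparse_dot_product
-- ===== SOURCE A (Python) =====
-- def sparse_dot_product(dict1, dict2):
--     result = 0
--     for i in dict1.keys():
--         for j in dict2.keys():
--             if i == j:
--                 result += dict1[i] * dict2[j]
--             else:
--                 result += 0
--     return result
-- ===== SOURCE B (Python) =====
-- def sparse_dot_product(dict1, dict2):
--     small, big = (dict1, dict2) if len(dict1) <= len(dict2) else (dict2, dict1)
--     result = 0
--     for k, v in small.items():
--         w = big.get(k)
--         if w is not None: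
--             result += v * w
--     return result
-- ===== Notes on version B (the rewrite author's own statement) =====
-- stated objective: faster
-- what changed: Replaces the nested scan over both key sets (with repeated d[i] lookups) by a single pass over the smaller dict with one hash lookup in the larger dict per key.
import Mathlib
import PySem

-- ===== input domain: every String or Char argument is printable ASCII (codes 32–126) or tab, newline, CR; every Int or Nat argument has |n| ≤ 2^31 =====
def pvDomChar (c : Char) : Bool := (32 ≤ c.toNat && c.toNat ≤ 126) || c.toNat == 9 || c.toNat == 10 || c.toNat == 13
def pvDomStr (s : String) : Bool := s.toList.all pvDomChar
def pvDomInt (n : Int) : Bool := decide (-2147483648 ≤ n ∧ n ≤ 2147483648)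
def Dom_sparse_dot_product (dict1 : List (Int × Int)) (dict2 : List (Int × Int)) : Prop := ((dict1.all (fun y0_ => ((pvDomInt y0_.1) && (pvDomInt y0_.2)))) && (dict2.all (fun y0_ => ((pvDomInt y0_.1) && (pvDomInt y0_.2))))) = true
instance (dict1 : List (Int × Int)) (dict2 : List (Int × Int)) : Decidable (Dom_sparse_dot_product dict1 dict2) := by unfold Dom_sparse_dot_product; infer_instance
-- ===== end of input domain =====

-- B iterates the smaller dict once, looking each key up in the larger dict: O(min(n,m)) instead of A's nested O(n*m) scan.

-- ===== PORT A =====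
-- dict1[i] / dict2[j] are ported as getD _ 0: inside the loop i ∈ d1.keys and j ∈ d2.keys, so the lookup never misses.
def sparse_dot_product (dict1 : List (Int × Int)) (dict2 : List (Int × Int)) : Int :=
  let d1 := PySem.Dict.mk dict1
  let d2 := PySem.Dict.mk dict2
  d1.keys.foldl (fun result i =>
    d2.keys.foldl (fun result j =>
      if i == j then result + d1.getD i 0 * d2.getD j 0 else result + 0) result) 0

-- ===== PORT B =====
def sparse_dot_product_alt (dict1 : List (Int × Int)) (dict2 : List (Int × Int)) : Int :=
  let sb := if dict1.length ≤ dict2.length then (dict1, dict2) else (dict2, dict1)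
  let bigD := PySem.Dict.mk sb.2
  sb.1.foldl (fun result p =>
    match bigD.get? p.1 with
    | some w => result + p.2 * w
    | none => result) 0

-- ===== PRECONDITION & SPEC =====
-- Pre_ requires the keys inside each association list to be distinct, which holds for every genuine Python
-- dict; duplicate-key lists do not correspond to any Python input of A, so nothing A returns on is excluded.
def Pre_sparse_dot_product (dict1 : List (Int × Int)) (dict2 : List (Int × Int)) : Prop :=
  (dict1.map Prod.fst).Nodup ∧ (dict2.map Prod.fst).Nodup
instance (dict1 : List (Int × Int)) (dict2 : List (Int × Int)) : Decidable (Pre_sparse_dot_product dict1 dict2) := by unfold Pre_sparse_dot_product; infer_instance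

def pvWitness_sparse_dot_product : (List (Int × Int)) × (List (Int × Int)) := ([(1, 2), (3, 4)], [(1, 5)])

def Spec_sparse_dot_product (dict1 : List (Int × Int)) (dict2 : List (Int × Int)) (out : Int) : Prop := out = sparse_dot_product_alt dict1 dict2
instance (dict1 : List (Int × Int)) (dict2 : List (Int × Int)) (out : Int) : Decidable (Spec_sparse_dot_product dict1 dict2 out) := by unfold Spec_sparse_dot_product; infer_instance

-- ===== CLAIM (what is proved, stated in full; the proofs are below) =====
def Claim_equal_sparse_dot_product : Prop := ∀ (dict1 : List (Int × Int)) (dict2 : List (Int × Int)), Dom_sparse_dot_product dict1 dict2 → Pre_sparse_dot_product dict1 dict2 → Spec_sparse_dot_product dict1 dict2 (sparse_dot_product dict1 dict2)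

-- ===== LEMMAS AND PROOFS =====

-- the symmetric double sum both programs compute
def pvSAB (l1 l2 : List (Int × Int)) : Int :=
  (l1.map (fun p => (l2.map (fun q => if p.1 = q.1 then p.2 * q.2 else 0)).sum)).sum

theorem pvSAB_cons_right (l1 : List (Int × Int)) (q : Int × Int) (l2 : List (Int × Int)) :
    pvSAB l1 (q :: l2) =
      (l1.map (fun p => if p.1 = q.1 then p.2 * q.2 else 0)).sum + pvSAB l1 l2 := by
  induction l1 with
  | nil => simp [pvSAB]
  | cons p l1 ih =>
    simp only [pvSAB, List.map_cons, List.sum_cons] at ih ⊢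
    rw [ih]; ring

theorem pvSAB_comm (l1 l2 : List (Int × Int)) : pvSAB l1 l2 = pvSAB l2 l1 := by
  induction l1 with
  | nil => simp [pvSAB]
  | cons p l1 ih =>
    rw [pvSAB_cons_right l2 p l1]
    simp only [pvSAB, List.map_cons, List.sum_cons] at ih ⊢
    rw [ih]
    congr 1
    refine congrArg List.sum (List.map_congr_left ?_)
    intro q _
    by_cases h : p.1 = q.1
    · simp [h, mul_comm]
    · rw [if_neg h, if_neg (fun hq : q.1 = p.1 => h hq.symm)]

-- first-match lookup of k in a nodup-keyed list equals the 0/1 sum over the list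
theorem pv_sum_zero_of_not_mem (l : List (Int × Int)) (k : Int) (h : k ∉ l.map Prod.fst) :
    (l.map (fun q => if k = q.1 then q.2 else 0)).sum = 0 := by
  induction l with
  | nil => simp
  | cons q l ih =>
    simp only [List.map_cons, List.mem_cons, not_or] at h
    rw [List.map_cons, List.sum_cons, if_neg h.1, ih h.2]
    simp

theorem pv_lk_eq_sum (l : List (Int × Int)) (k : Int) (h : (l.map Prod.fst).Nodup) :
    ((PySem.Dict.mk l).get? k).getD 0 = (l.map (fun q => if k = q.1 then q.2 else 0)).sum := by
  induction l with
  | nil => simp [PySem.Dict.get?]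
  | cons q l ih =>
    simp only [List.map_cons, List.nodup_cons] at h
    rw [PySem.Dict.get?_mk_cons]
    by_cases hk : q.1 = k
    · subst hk
      simp [pv_sum_zero_of_not_mem l q.1 h.1]
    · have : (q.1 == k) = false := by simp [hk]
      simp [this, Ne.symm hk, ih h.2]

-- the value stored at a key of a nodup-keyed list IS its first-match lookup
theorem pv_lk_of_mem (l : List (Int × Int)) (p : Int × Int) (hm : p ∈ l)
    (h : (l.map Prod.fst).Nodup) : ((PySem.Dict.mk l).get? p.1).getD 0 = p.2 := by
  induction l with
  | nil => simp at hm
  | cons q l ih =>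
    simp only [List.map_cons, List.nodup_cons] at h
    rw [PySem.Dict.get?_mk_cons]
    rcases List.mem_cons.mp hm with rfl | hm'
    · simp
    · have hne : q.1 ≠ p.1 := by
        intro he
        exact h.1 (he ▸ List.mem_map_of_mem hm')
      simp [hne, ih hm' h.2]

-- A's inner loop for a fixed i
theorem pv_inner (i : Int) (c : Int → Int) (l : List Int) (r : Int) :
    l.foldl (fun result j => if i == j then result + c j else result + 0) r =
      r + (l.map (fun j => if i = j then c j else 0)).sum := by
  induction l generalizing r with
  | nil => simp
  | cons j l ih =>
    simp only [List.foldl_cons, ih]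
    by_cases h : i = j <;> simp [h] <;> ring

-- A computes the symmetric double sum
theorem pvA_eq_sAB (l1 l2 : List (Int × Int)) (h1 : (l1.map Prod.fst).Nodup)
    (h2 : (l2.map Prod.fst).Nodup) : sparse_dot_product l1 l2 = pvSAB l1 l2 := by
  unfold sparse_dot_product
  simp only [PySem.Dict.keys_mk, PySem.Dict.getD_eq_get?_getD]
  have hfold : ∀ (r : Int) (m : List (Int × Int)), (∀ p ∈ m, p ∈ l1) →
      (m.map Prod.fst).foldl (fun result i =>
        (l2.map Prod.fst).foldl (fun result j =>
          if i == j then result + ((PySem.Dict.mk l1).get? i).getD 0 * ((PySem.Dict.mk l2).get? j).getD 0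
          else result + 0) result) r = r + pvSAB m l2 := by
    intro r m hsub
    induction m generalizing r with
    | nil => simp [pvSAB]
    | cons p m ih =>
      simp only [List.map_cons, List.foldl_cons]
      rw [pv_inner, ih _ (fun q hq => hsub q (List.mem_cons_of_mem _ hq))]
      have hp : p ∈ l1 := hsub p List.mem_cons_self
      simp only [pvSAB, List.map_cons, List.sum_cons]
      have hrow : ((l2.map Prod.fst).map (fun j =>
          if p.1 = j then ((PySem.Dict.mk l1).get? p.1).getD 0 * ((PySem.Dict.mk l2).get? j).getD 0 else 0)).sum
          = (l2.map (fun q => if p.1 = q.1 then p.2 * q.2 else 0)).sum := by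
        rw [List.map_map]
        apply congrArg
        apply List.map_congr_left
        intro q hq
        simp only [Function.comp_apply]
        by_cases h : p.1 = q.1
        · simp only [if_pos h]
          rw [pv_lk_of_mem l1 p hp h1, pv_lk_of_mem l2 q hq h2]
        · simp [h]
      rw [hrow]; ring
  rw [hfold 0 l1 (fun p hp => hp)]
  ring

-- B's single pass over l1 with lookups into l2 computes the double sum too
theorem pvB_pass_eq_sAB (l1 l2 : List (Int × Int)) (h2 : (l2.map Prod.fst).Nodup) :
    l1.foldl (fun result p =>
      match (PySem.Dict.mk l2).get? p.1 with
      | some w => result + p.2 * w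
      | none => result) 0 = pvSAB l1 l2 := by
  have hstep : ∀ (result : Int) (p : Int × Int),
      (match (PySem.Dict.mk l2).get? p.1 with
        | some w => result + p.2 * w
        | none => result) = result + p.2 * ((PySem.Dict.mk l2).get? p.1).getD 0 := by
    intro result p
    cases h : (PySem.Dict.mk l2).get? p.1
    · simp [h]
    · simp [h]
  calc l1.foldl (fun result p =>
        match (PySem.Dict.mk l2).get? p.1 with
        | some w => result + p.2 * w
        | none => result) 0
      = l1.foldl (fun result p => result + p.2 * ((PySem.Dict.mk l2).get? p.1).getD 0) 0 := by
        have hfn : (fun (result : Int) (p : Int × Int) =>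
            match (PySem.Dict.mk l2).get? p.1 with
            | some w => result + p.2 * w
            | none => result) =
            (fun result p => result + p.2 * ((PySem.Dict.mk l2).get? p.1).getD 0) := by
          funext a p
          exact hstep a p
        rw [hfn]
    _ = pvSAB l1 l2 := by
        rw [PySem.List.foldl_add]
        simp only [zero_add, pvSAB]
        apply congrArg
        apply List.map_congr_left
        intro p _
        rw [pv_lk_eq_sum l2 p.1 h2, ← List.sum_map_mul_left]
        apply congrArg
        apply List.map_congr_left
        intro q _
        by_cases h : p.1 = q.1 <;> simp [h]

-- ===== VERDICT (by name: the statement is the Claim_ definition above) =====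
theorem sparse_dot_product_spec : Claim_equal_sparse_dot_product := by
  intro d1 d2 _ hpre
  obtain ⟨h1, h2⟩ := hpre
  show sparse_dot_product d1 d2 = sparse_dot_product_alt d1 d2
  unfold sparse_dot_product_alt
  by_cases hlen : d1.length ≤ d2.length
  · simp only [hlen, if_pos]
    rw [pvB_pass_eq_sAB d1 d2 h2, pvA_eq_sAB d1 d2 h1 h2]
  · simp only [hlen, if_neg, not_false_iff]
    rw [pvB_pass_eq_sAB d2 d1 h1, pvA_eq_sAB d1 d2 h1 h2, pvSAB_comm]
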